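-- pv_equiv track=rewrite | github.com/Xuehaiz/basicML | ML472/decision_tree_id3/id3.py | count_collect
-- ===== SOURCE A (Python) =====
-- def count_collect(data, varnames):
--     total = len(data)
--     var_len = len(varnames) - 1
--     # find py  (checked)
--     counter = 0
--     for i in range(total):
--         if data[i][var_len] == 1:
--             counter += 1
--     py = counter
--
--     # find pxi and pxi_py (checked)
--     pxi_list = [0] * var_len
--     py_pxi_list = [0] * var_len
--     for i in range(var_len):
--         counter = 0
--         count = 0
--         for j in range(total):
--             if data[j][i] == 1:
--                 counter += 1
--             if data[j][var_len] == 1 and data[j][i] == 1: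
--                 count += 1
--         pxi_list[i] = counter
--         py_pxi_list[i] = count
--     return py, pxi_list, py_pxi_list
-- ===== SOURCE B (Python) =====
-- def count_collect(data, varnames):
--     var_len = len(varnames) - 1
--     py = 0
--     pxi_list = [0] * var_len
--     py_pxi_list = [0] * var_len
--     for row in data:
--         y = row[var_len] == 1
--         if y:
--             py += 1
--         pxi_list = [c + (1 if row[i] == 1 else 0) for i, c in enumerate(pxi_list)]
--         py_pxi_list = [c + (1 if y and row[i] == 1 else 0) for i, c in enumerate(py_pxi_list)]
--     return py, pxi_list, py_pxi_list
-- ===== Notes on version B (the rewrite author's own statement) =====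
-- stated objective: alternative
-- what changed: B makes a single pass over the rows, maintaining the label count and both per-feature count vectors simultaneously, instead of A's var_len+1 separate scans of the data (one for py, then one scan per feature).
import Mathlib
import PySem

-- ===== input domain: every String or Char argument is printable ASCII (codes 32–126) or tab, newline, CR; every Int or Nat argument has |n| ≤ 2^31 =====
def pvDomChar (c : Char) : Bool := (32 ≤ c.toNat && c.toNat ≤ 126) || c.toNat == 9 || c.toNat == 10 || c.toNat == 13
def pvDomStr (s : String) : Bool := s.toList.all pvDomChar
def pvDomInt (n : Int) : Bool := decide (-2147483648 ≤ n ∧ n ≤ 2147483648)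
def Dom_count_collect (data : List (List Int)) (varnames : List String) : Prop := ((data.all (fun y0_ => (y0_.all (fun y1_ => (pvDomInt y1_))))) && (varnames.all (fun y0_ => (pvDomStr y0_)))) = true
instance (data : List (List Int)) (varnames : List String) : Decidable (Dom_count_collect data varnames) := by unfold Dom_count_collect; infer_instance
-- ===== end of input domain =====

-- B replaces A's var_len+1 separate scans of the data (one for py, then one per feature)
-- by a single pass over the rows that maintains py and both per-feature count vectors at once;
-- same cost class, different traversal (equivalence proved below).

-- ===== PORT A =====
-- Literal port of A: the index-assignment loop 'pxi_list[i] = counter; py_pxi_list[i] = count'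
-- (filled at i = 0,1,…,var_len-1 in order) is ported as appending to two accumulator lists.
def count_collect (data : List (List Int)) (varnames : List String) : Int × List Int × List Int :=
  let total : Int := (data.length : Int)
  let var_len : Int := (varnames.length : Int) - 1
  let py : Int :=
    (PySem.List.pyRange 0 total 1).foldl
      (fun counter i =>
        if PySem.List.pyGetD (PySem.List.pyGetD data i []) var_len 0 = 1 then counter + 1 else counter) 0
  let lists : List Int × List Int :=
    (PySem.List.pyRange 0 var_len 1).foldl
      (fun ls i =>
        let cc : Int × Int :=
          (PySem.List.pyRange 0 total 1).foldl
            (fun cc j =>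
              ((if PySem.List.pyGetD (PySem.List.pyGetD data j []) i 0 = 1 then cc.1 + 1 else cc.1),
               (if PySem.List.pyGetD (PySem.List.pyGetD data j []) var_len 0 = 1 ∧
                   PySem.List.pyGetD (PySem.List.pyGetD data j []) i 0 = 1 then cc.2 + 1 else cc.2)))
            (0, 0)
        (ls.1 ++ [cc.1], ls.2 ++ [cc.2]))
      ([], [])
  (py, lists.1, lists.2)

-- ===== PORT B =====
def count_collect_alt (data : List (List Int)) (varnames : List String) : Int × List Int × List Int :=
  let var_len : Int := (varnames.length : Int) - 1
  data.foldl
    (fun st row =>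
      let yv : Int := PySem.List.pyGetD row var_len 0
      ((if yv = 1 then st.1 + 1 else st.1),
       (PySem.List.enumerate st.2.1 0).map
         (fun ic => ic.2 + (if PySem.List.pyGetD row ic.1 0 = 1 then 1 else 0)),
       (PySem.List.enumerate st.2.2 0).map
         (fun ic => ic.2 + (if yv = 1 ∧ PySem.List.pyGetD row ic.1 0 = 1 then 1 else 0))))
    (0, List.replicate var_len.toNat 0, List.replicate var_len.toNat 0)

-- ===== PRECONDITION & SPEC =====
-- Pre_ excludes exactly the inputs on which Python A raises IndexError: some row shorter than
-- len(varnames) (or an empty row when varnames is empty, where data[i][-1] is read).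
def Pre_count_collect (data : List (List Int)) (varnames : List String) : Prop :=
  ∀ row ∈ data, max 1 varnames.length ≤ row.length
instance (data : List (List Int)) (varnames : List String) : Decidable (Pre_count_collect data varnames) := by unfold Pre_count_collect; infer_instance
def pvWitness_count_collect : List (List Int) × List String :=
  ([[1, 0, 1], [0, 1, 1], [1, 1, 0]], ["a", "b", "y"])

def Spec_count_collect (data : List (List Int)) (varnames : List String) (out : Int × List Int × List Int) : Prop := out = count_collect_alt data varnames
instance (data : List (List Int)) (varnames : List String) (out : Int × List Int × List Int) : Decidable (Spec_count_collect data varnames out) := by unfold Spec_count_collect; infer_instance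

-- ===== CLAIM (what is proved, stated in full; the proofs are below) =====
def Claim_equal_count_collect : Prop := ∀ (data : List (List Int)) (varnames : List String), Dom_count_collect data varnames → Pre_count_collect data varnames → Spec_count_collect data varnames (count_collect data varnames)

-- ===== LEMMAS AND PROOFS =====

-- counting loop 'if p(row): c += 1' as a 0/1 indicator sum
theorem pv_foldl_ite_sum (p : List Int → Prop) [DecidablePred p] (l : List (List Int)) (a : Int) :
    l.foldl (fun c row => if p row then c + 1 else c) a
      = a + (l.map (fun row => if p row then (1 : Int) else 0)).sum := by
  induction l generalizing a with
  | nil => simp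
  | cons r d ih => simp only [List.foldl_cons, List.map_cons, List.sum_cons, ih]; split_ifs <;> ring

theorem pv_enum_map_enum (F : Int → Int → Int) (l : List Int) :
    ∀ (s : Int),
      PySem.List.enumerate ((PySem.List.enumerate l s).map (fun ic => F ic.1 ic.2)) s
        = (PySem.List.enumerate l s).map (fun ic => (ic.1, F ic.1 ic.2)) := by
  induction l with
  | nil => intro s; simp [PySem.List.enumerate_nil]
  | cons x xs ih => intro s; simp [PySem.List.enumerate_cons, ih]

-- B's repeated per-row rebuild of a counter list, summed out
theorem pv_foldl_enum_add (w : List Int → Int → Int) (data : List (List Int)) :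
    ∀ (l : List Int),
      data.foldl (fun l row => (PySem.List.enumerate l 0).map (fun ic => ic.2 + w row ic.1)) l
        = (PySem.List.enumerate l 0).map
            (fun ic => ic.2 + (data.map (fun row => w row ic.1)).sum) := by
  induction data with
  | nil => intro l; simp [PySem.List.map_snd_enumerate]
  | cons r d ih =>
      intro l
      simp only [List.foldl_cons]
      rw [ih, pv_enum_map_enum (fun i c => c + w r i), List.map_map]
      refine List.map_congr_left ?_
      intro a _
      simp [add_assoc]

theorem pv_repl_enum (m : Nat) (S : Int → Int) :
    (PySem.List.enumerate (List.replicate m (0 : Int)) 0).map (fun ic => ic.2 + S ic.1)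
      = (PySem.List.pyRange 0 (m : Int) 1).map S := by
  rw [PySem.List.enumerate_eq_map_pyRange (List.replicate m (0 : Int)) 0, List.map_map]
  have hlen : PySem.List.len (List.replicate m (0 : Int)) = (m : Int) := by
    simp [PySem.List.len]
  rw [hlen]
  refine List.map_congr_left ?_
  intro j hj
  rw [PySem.List.mem_pyRange_one] at hj
  simp only [Function.comp]
  rw [PySem.List.pyGetD_eq_getElem _ 0 hj.1 (by simpa using hj.2)]
  simp

theorem pv_pyRange_toNat (L : Int) :
    PySem.List.pyRange 0 ((L.toNat : Int)) 1 = PySem.List.pyRange 0 L 1 := by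
  rw [PySem.List.pyRange_one, PySem.List.pyRange_one]
  simp
  congr 2
  omega

-- B's single row loop splits into three independent folds
theorem pv_triple_split (L : Int) (data : List (List Int)) :
    ∀ (s : Int × List Int × List Int),
      data.foldl
        (fun st row =>
          ((if PySem.List.pyGetD row L 0 = 1 then st.1 + 1 else st.1),
           (PySem.List.enumerate st.2.1 0).map
             (fun ic => ic.2 + (if PySem.List.pyGetD row ic.1 0 = 1 then 1 else 0)),
           (PySem.List.enumerate st.2.2 0).map
             (fun ic => ic.2 + (if PySem.List.pyGetD row L 0 = 1 ∧ PySem.List.pyGetD row ic.1 0 = 1 then 1 else 0)))) s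
        = (data.foldl (fun c row => if PySem.List.pyGetD row L 0 = 1 then c + 1 else c) s.1,
           data.foldl (fun l row => (PySem.List.enumerate l 0).map
             (fun ic => ic.2 + (if PySem.List.pyGetD row ic.1 0 = 1 then 1 else 0))) s.2.1,
           data.foldl (fun l row => (PySem.List.enumerate l 0).map
             (fun ic => ic.2 + (if PySem.List.pyGetD row L 0 = 1 ∧ PySem.List.pyGetD row ic.1 0 = 1 then 1 else 0))) s.2.2) := by
  induction data with
  | nil => intro s; rfl
  | cons r d ih => intro s; simp only [List.foldl_cons]; rw [ih]

theorem pv_main_eq (data : List (List Int)) (varnames : List String) :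
    count_collect data varnames = count_collect_alt data varnames := by
  simp only [count_collect, count_collect_alt]
  rw [pv_triple_split]
  have hpy := PySem.List.foldl_pyRange_zero_pyGetD' data ([] : List Int)
    (fun (c : Int) row => if PySem.List.pyGetD row ((varnames.length : Int) - 1) 0 = 1 then c + 1 else c) 0
  rw [hpy]
  have hinner : ∀ i : Int,
      List.foldl
        (fun (cc : Int × Int) j =>
          ((if PySem.List.pyGetD (PySem.List.pyGetD data j []) i 0 = 1 then cc.1 + 1 else cc.1),
           (if PySem.List.pyGetD (PySem.List.pyGetD data j []) ((varnames.length : Int) - 1) 0 = 1 ∧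
               PySem.List.pyGetD (PySem.List.pyGetD data j []) i 0 = 1 then cc.2 + 1 else cc.2)))
        (0, 0) (PySem.List.pyRange 0 (data.length : Int) 1)
      = ((data.map (fun row => if PySem.List.pyGetD row i 0 = 1 then (1 : Int) else 0)).sum,
         (data.map (fun row => if PySem.List.pyGetD row ((varnames.length : Int) - 1) 0 = 1 ∧
              PySem.List.pyGetD row i 0 = 1 then (1 : Int) else 0)).sum) := by
    intro i
    rw [PySem.List.foldl_pyRange_zero_pyGetD' data ([] : List Int)
      (fun (cc : Int × Int) row =>
        ((if PySem.List.pyGetD row i 0 = 1 then cc.1 + 1 else cc.1),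
         (if PySem.List.pyGetD row ((varnames.length : Int) - 1) 0 = 1 ∧
             PySem.List.pyGetD row i 0 = 1 then cc.2 + 1 else cc.2))) (0, 0)]
    rw [PySem.List.foldl_prod_mk
      (f := fun (c : Int) row => if PySem.List.pyGetD row i 0 = 1 then c + 1 else c)
      (g := fun (c : Int) row => if PySem.List.pyGetD row ((varnames.length : Int) - 1) 0 = 1 ∧
          PySem.List.pyGetD row i 0 = 1 then c + 1 else c)]
    rw [pv_foldl_ite_sum, pv_foldl_ite_sum]
    simp
  simp only [hinner]
  rw [PySem.List.foldl_prod_mk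
    (f := fun (ls : List Int) i => ls ++ [(data.map (fun row => if PySem.List.pyGetD row i 0 = 1 then (1 : Int) else 0)).sum])
    (g := fun (ls : List Int) i => ls ++ [(data.map (fun row => if PySem.List.pyGetD row ((varnames.length : Int) - 1) 0 = 1 ∧
        PySem.List.pyGetD row i 0 = 1 then (1 : Int) else 0)).sum])]
  rw [PySem.List.foldl_append_singleton_eq_map, PySem.List.foldl_append_singleton_eq_map]
  rw [pv_foldl_enum_add (fun row i => if PySem.List.pyGetD row i 0 = 1 then (1 : Int) else 0) data]
  rw [pv_foldl_enum_add (fun row i => if PySem.List.pyGetD row ((varnames.length : Int) - 1) 0 = 1 ∧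
        PySem.List.pyGetD row i 0 = 1 then (1 : Int) else 0) data]
  rw [pv_repl_enum ((varnames.length : Int) - 1).toNat
    (fun i => (data.map (fun row => if PySem.List.pyGetD row i 0 = 1 then (1 : Int) else 0)).sum)]
  rw [pv_repl_enum ((varnames.length : Int) - 1).toNat
    (fun i => (data.map (fun row => if PySem.List.pyGetD row ((varnames.length : Int) - 1) 0 = 1 ∧
        PySem.List.pyGetD row i 0 = 1 then (1 : Int) else 0)).sum)]
  rw [pv_pyRange_toNat]
  simp

-- ===== VERDICT (by name: the statement is the Claim_ definition above) =====
theorem count_collect_spec : Claim_equal_count_collect := by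
  intro data varnames _ _
  unfold Spec_count_collect
  exact pv_main_eq data varnames
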